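-- pv_equiv track=rewrite | github.com/NaasaX/Projets | Projet_Prenom/Projet_Natalite.py | requete2
-- ===== SOURCE A (Python) =====
-- def requete2(donnees, annee):
--
--     effectif_rares = 0
--     effectif_garcon = 0
--     prenom_garcon = ""
--     prenom_rares = ""
--
--     for ligne in donnees:
--         if ligne[2] == annee:
--             if ligne[0] == "1":
--                 if ligne[1] != "_PRENOMS_RARES":
--                     if int(ligne[3]) > effectif_garcon:
--                         effectif_garcon = int(ligne[3])
--                         prenom_garcon = ligne[1]
--
--
--     effectif_fille = 0
--     prenom_fille = ""
--
--     for ligne in donnees: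
--         if ligne[2] == annee:
--             if ligne[0] == "2":
--                 if ligne[1] != "_PRENOMS_RARES":
--                     if int(ligne[3]) > effectif_fille:
--                         effectif_fille = int(ligne[3])
--                         prenom_fille = ligne[1]
--
--
--     return (effectif_garcon, prenom_garcon, effectif_fille, prenom_fille)
-- ===== SOURCE B (Python) =====
-- def requete2(donnees, annee):
--     def best(sexe):
--         cand = [l for l in donnees
--                 if l[2] == annee and l[0] == sexe
--                 and l[1] != "_PRENOMS_RARES" and int(l[3]) > 0]
--         if not cand:
--             return (0, "")
--         m = max(cand, key=lambda l: int(l[3]))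
--         return (int(m[3]), m[1])
--     eg, pg = best("1")
--     ef, pf = best("2")
--     return (eg, pg, ef, pf)
-- ===== Notes on version B (the rewrite author's own statement) =====
-- stated objective: alternative
-- what changed: Replaces A's two hand-rolled running-maximum accumulator loops by a grouping decomposition: per sex, build the filtered candidate list for the year (excluding _PRENOMS_RARES and non-positive counts) and take max with key int(row[3]) (first maximal row), mapping an empty group to (0, '').
import Mathlib
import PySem

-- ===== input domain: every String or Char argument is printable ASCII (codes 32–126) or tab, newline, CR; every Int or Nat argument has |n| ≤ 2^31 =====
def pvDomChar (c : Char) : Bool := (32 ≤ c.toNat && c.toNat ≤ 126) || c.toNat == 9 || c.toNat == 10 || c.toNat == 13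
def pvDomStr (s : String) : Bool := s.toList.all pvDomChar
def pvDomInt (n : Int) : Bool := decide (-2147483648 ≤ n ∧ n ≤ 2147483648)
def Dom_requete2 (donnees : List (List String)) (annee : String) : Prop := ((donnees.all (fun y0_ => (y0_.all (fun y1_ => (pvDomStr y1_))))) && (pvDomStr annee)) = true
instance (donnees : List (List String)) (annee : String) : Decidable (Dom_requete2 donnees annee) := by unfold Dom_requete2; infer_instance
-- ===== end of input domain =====

-- B replaces A's two hand-rolled running-maximum loops by filter-then-max-with-key per sex
-- (objective: alternative decomposition, same O(n) cost); return value only, no mutation.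

-- shared indexing helper: ligne[i] (exact inside Pre_requete2, where the index is in range)
def pvGet (l : List String) (i : Nat) : String := l.getD i ""

-- ===== PORT A =====
-- literal transliteration of A: two accumulator loops over donnees (boys then girls),
-- strict '>' keeps the first maximal row; int() is PySem.Int.ofStr?, exact inside Pre_requete2.
def requete2 (donnees : List (List String)) (annee : String) : Int × String × Int × String :=
  let g := donnees.foldl (fun (st : Int × String) ligne =>
      if pvGet ligne 2 = annee then
        if pvGet ligne 0 = "1" then
          if pvGet ligne 1 ≠ "_PRENOMS_RARES" then
            match PySem.Int.ofStr? (pvGet ligne 3) with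
            | some n => if n > st.1 then (n, pvGet ligne 1) else st
            | none => st  -- Python raises ValueError here; excluded by Pre_requete2
          else st
        else st
      else st) ((0 : Int), "")
  let f := donnees.foldl (fun (st : Int × String) ligne =>
      if pvGet ligne 2 = annee then
        if pvGet ligne 0 = "2" then
          if pvGet ligne 1 ≠ "_PRENOMS_RARES" then
            match PySem.Int.ofStr? (pvGet ligne 3) with
            | some n => if n > st.1 then (n, pvGet ligne 1) else st
            | none => st  -- Python raises ValueError here; excluded by Pre_requete2
          else st
        else st
      else st) ((0 : Int), "")
  (g.1, g.2, f.1, f.2)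

-- ===== PORT B =====
-- helpers of B: the key int(l[3]) and the candidate test of the list comprehension
def pvKey (l : List String) : Int := (PySem.Int.ofStr? (pvGet l 3)).getD 0

def pvCand (annee sexe : String) (l : List String) : Bool :=
  decide (pvGet l 2 = annee) && decide (pvGet l 0 = sexe) &&
  decide (pvGet l 1 ≠ "_PRENOMS_RARES") && decide (0 < pvKey l)

def pvBest (donnees : List (List String)) (annee sexe : String) : Int × String :=
  match PySem.List.max? (donnees.filter (pvCand annee sexe)) pvKey with
  | none => ((0 : Int), "")
  | some m => (pvKey m, pvGet m 1)

def requete2_alt (donnees : List (List String)) (annee : String) : Int × String × Int × String :=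
  let g := pvBest donnees annee "1"
  let f := pvBest donnees annee "2"
  (g.1, g.2, f.1, f.2)

-- ===== PRECONDITION & SPEC =====
-- Pre_ excludes exactly the inputs where Python A raises: a row shorter than 3
-- (IndexError at ligne[2]), or a row matching year+sex+non-rare that is shorter
-- than 4 (IndexError at ligne[3]) or whose ligne[3] is not int-parsable (ValueError).
def Pre_requete2 (donnees : List (List String)) (annee : String) : Prop :=
  ∀ l ∈ donnees, 3 ≤ l.length ∧
    ((pvGet l 2 = annee ∧ (pvGet l 0 = "1" ∨ pvGet l 0 = "2") ∧
      pvGet l 1 ≠ "_PRENOMS_RARES") →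
      4 ≤ l.length ∧ (PySem.Int.ofStr? (pvGet l 3)).isSome)
instance (donnees : List (List String)) (annee : String) : Decidable (Pre_requete2 donnees annee) := by unfold Pre_requete2; infer_instance

def pvWitness_requete2 : List (List String) × String :=
  ([["1", "Jean", "2000", "5"], ["2", "Marie", "2000", "7"], ["1", "Luc", "2000", "5"]], "2000")

def Spec_requete2 (donnees : List (List String)) (annee : String) (out : Int × String × Int × String) : Prop := out = requete2_alt donnees annee
instance (donnees : List (List String)) (annee : String) (out : Int × String × Int × String) : Decidable (Spec_requete2 donnees annee out) := by unfold Spec_requete2; infer_instance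

-- ===== CLAIM (what is proved, stated in full; the proofs are below) =====
def Claim_equal_requete2 : Prop := ∀ (donnees : List (List String)) (annee : String), Dom_requete2 donnees annee → Pre_requete2 donnees annee → Spec_requete2 donnees annee (requete2 donnees annee)

-- ===== LEMMAS AND PROOFS =====

-- A's loop body for a given sex, as a named step function (definitionally the lambdas of port A)
def pvStepA (annee sexe : String) (st : Int × String) (ligne : List String) : Int × String :=
  if pvGet ligne 2 = annee then
    if pvGet ligne 0 = sexe then
      if pvGet ligne 1 ≠ "_PRENOMS_RARES" then
        match PySem.Int.ofStr? (pvGet ligne 3) with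
        | some n => if n > st.1 then (n, pvGet ligne 1) else st
        | none => st
      else st
    else st
  else st

-- B's max?-on-filter, as one fold over donnees
def pvStepB (annee sexe : String) (acc : Option (List String)) (l : List String) :
    Option (List String) :=
  if pvCand annee sexe l then
    match acc with
    | none => some l
    | some m => if pvKey m < pvKey l then some l else some m
  else acc

-- invariant relating B's accumulator to A's
def pvRel (annee sexe : String) (acc : Option (List String)) (st : Int × String) : Prop :=
  match acc with
  | none => st = ((0 : Int), "")
  | some m => pvCand annee sexe m = true ∧ st = (pvKey m, pvGet m 1)

lemma pvCand_iff {annee sexe : String} {l : List String} :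
    pvCand annee sexe l = true ↔
      pvGet l 2 = annee ∧ pvGet l 0 = sexe ∧ pvGet l 1 ≠ "_PRENOMS_RARES" ∧ 0 < pvKey l := by
  simp [pvCand, and_assoc]

lemma pvStepA_cand {annee sexe : String} {l : List String} (st : Int × String)
    (hc : pvCand annee sexe l = true) :
    pvStepA annee sexe st l = if pvKey l > st.1 then (pvKey l, pvGet l 1) else st := by
  obtain ⟨h2, h0, h1, hk⟩ := pvCand_iff.mp hc
  unfold pvStepA
  rw [if_pos h2, if_pos h0, if_pos h1]
  cases hp : PySem.Int.ofStr? (pvGet l 3) with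
  | none => simp [pvKey, hp] at hk
  | some n => have : pvKey l = n := by simp [pvKey, hp]
              rw [this]

lemma pvStepA_noncand {annee sexe : String} {l : List String} (st : Int × String)
    (hst : 0 ≤ st.1) (hc : ¬ pvCand annee sexe l = true) :
    pvStepA annee sexe st l = st := by
  unfold pvStepA
  by_cases h2 : pvGet l 2 = annee
  · by_cases h0 : pvGet l 0 = sexe
    · by_cases h1 : pvGet l 1 = "_PRENOMS_RARES"
      · simp [h2, h0, h1]
      · have hk : ¬ 0 < pvKey l := fun hpos => hc (pvCand_iff.mpr ⟨h2, h0, h1, hpos⟩)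
        rw [if_pos h2, if_pos h0, if_pos h1]
        cases hp : PySem.Int.ofStr? (pvGet l 3) with
        | none => rfl
        | some n =>
          have hn : pvKey l = n := by simp [pvKey, hp]
          have hng : ¬ n > st.1 := by omega
          simp only [hng, if_false]
    · rw [if_pos h2, if_neg h0]
  · rw [if_neg h2]

lemma pvRel_fst_nonneg {annee sexe : String} {acc : Option (List String)} {st : Int × String}
    (h : pvRel annee sexe acc st) : 0 ≤ st.1 := by
  cases acc with
  | none => simp only [pvRel] at h; rw [h]
  | some m =>
    obtain ⟨hm, hst⟩ := h
    have := (pvCand_iff.mp hm).2.2.2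
    rw [hst]; dsimp; omega

lemma pvStepB_pos {annee sexe : String} {l : List String} (acc : Option (List String))
    (hc : pvCand annee sexe l = true) :
    pvStepB annee sexe acc l =
      match acc with
      | none => some l
      | some m => if pvKey m < pvKey l then some l else some m := by
  simp [pvStepB, hc]

lemma pvStepB_neg {annee sexe : String} {l : List String} (acc : Option (List String))
    (hc : ¬ pvCand annee sexe l = true) : pvStepB annee sexe acc l = acc := by
  simp [pvStepB, hc]

lemma pvStep_rel (annee sexe : String) (acc : Option (List String)) (st : Int × String)
    (l : List String) (h : pvRel annee sexe acc st) :
    pvRel annee sexe (pvStepB annee sexe acc l) (pvStepA annee sexe st l) := by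
  by_cases hc : pvCand annee sexe l = true
  · rw [pvStepA_cand st hc, pvStepB_pos acc hc]
    cases acc with
    | none =>
      simp only [pvRel] at h; subst h
      show pvRel annee sexe (some l)
        (if pvKey l > (0 : Int) then (pvKey l, pvGet l 1) else (((0 : Int), "") : Int × String))
      have hgt : pvKey l > (0 : Int) := (pvCand_iff.mp hc).2.2.2
      rw [if_pos hgt]
      exact ⟨hc, rfl⟩
    | some m =>
      obtain ⟨hm, hst⟩ := h; subst hst
      show pvRel annee sexe (if pvKey m < pvKey l then some l else some m)
        (if pvKey m < pvKey l then (pvKey l, pvGet l 1) else ((pvKey m, pvGet m 1) : Int × String))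
      by_cases hlt : pvKey m < pvKey l
      · rw [if_pos hlt]
        exact ⟨hc, if_pos hlt⟩
      · rw [if_neg hlt]
        exact ⟨hm, if_neg hlt⟩
  · rw [pvStepB_neg acc hc, pvStepA_noncand st (pvRel_fst_nonneg h) hc]
    exact h

lemma pvFold_rel (annee sexe : String) (xs : List (List String))
    (acc : Option (List String)) (st : Int × String) (h : pvRel annee sexe acc st) :
    pvRel annee sexe (xs.foldl (pvStepB annee sexe) acc) (xs.foldl (pvStepA annee sexe) st) := by
  induction xs generalizing acc st with
  | nil => exact h
  | cons l t ih => exact ih _ _ (pvStep_rel annee sexe acc st l h)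

lemma pvMax?_eq_foldl (annee sexe : String) (donnees : List (List String)) :
    PySem.List.max? (donnees.filter (pvCand annee sexe)) pvKey =
      donnees.foldl (pvStepB annee sexe) none := by
  unfold PySem.List.max?
  rw [← PySem.List.foldl_if_eq_foldl_filter]
  apply List.foldl_ext
  intro acc x _
  by_cases hx : pvCand annee sexe x = true
  · rw [pvStepB_pos acc hx, if_pos hx]
    cases acc <;> rfl
  · rw [pvStepB_neg acc hx, if_neg hx]

lemma pvBest_eq (annee sexe : String) (donnees : List (List String)) :
    donnees.foldl (pvStepA annee sexe) ((0 : Int), "") = pvBest donnees annee sexe := by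
  have h := pvFold_rel annee sexe donnees none ((0 : Int), "") rfl
  unfold pvBest
  rw [pvMax?_eq_foldl]
  cases hacc : donnees.foldl (pvStepB annee sexe) none with
  | none => rw [hacc] at h; simpa using h
  | some m => rw [hacc] at h; exact h.2

-- ===== VERDICT (by name: the statement is the Claim_ definition above) =====
theorem requete2_spec : Claim_equal_requete2 := by
  intro donnees annee _ _
  show requete2 donnees annee = requete2_alt donnees annee
  show ((donnees.foldl (pvStepA annee "1") ((0 : Int), "")).1,
        (donnees.foldl (pvStepA annee "1") ((0 : Int), "")).2,
        (donnees.foldl (pvStepA annee "2") ((0 : Int), "")).1,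
        (donnees.foldl (pvStepA annee "2") ((0 : Int), "")).2) =
       ((pvBest donnees annee "1").1, (pvBest donnees annee "1").2,
        (pvBest donnees annee "2").1, (pvBest donnees annee "2").2)
  rw [pvBest_eq annee "1" donnees, pvBest_eq annee "2" donnees]
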